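-- pv_equiv track=rewrite | github.com/BellamyCeleman/Candidate_experience_extractor | Phone_numbers_remover/PhoneNumbersRemover.py | deletePhoneInformationManual
-- ===== SOURCE A (Python) =====
-- from typing import Optional, Set
--
-- UKRAINIAN_OPERATOR_CODES: Set[str] = {
--     # Kyivstar
--     '067', '068', '096', '097', '098',
--     # Vodafone
--     '050', '066', '095', '099',
--     # Lifecell
--     '063', '073', '093',
--     # Intertelecom (fixed)
--     '094',
--     # PEOPLEnet / 3Mob
--     '092',
--     # Ukrtelecom
--     '091',
--     # Trimob
--     '089',
-- }
--
-- def deletePhoneInformationManual(text: str, file_name: str) -> str: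
--     """
--     Alternative implementation without regular expressions.
--     Manually scans and replaces phone numbers for educational purposes.
--     """
--     result = []
--     i = 0
--     n = len(text)
--
--     def check_ukrainian_operator(digits: str) -> bool:
--         """Check if the number starts with a valid Ukrainian operator code."""
--         # Remove prefix +380 or 380
--         if digits.startswith('380'):
--             digits = digits[3:]
--         if len(digits) >= 3:
--             operator_code = digits[:3]
--             return operator_code in UKRAINIAN_OPERATOR_CODES
--         return False
--
--     while i < n:
--         # Detect potential start of a phone number: +, digit, or parenthesis
--         if text[i].isdigit() or text[i] == '+' or text[i] == '(':
--             phone_start = i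
--             phone_end = i
--             digit_count = 0
--             has_separator = False
--             digits_only = []
--
--             # Collect characters that can belong to a phone number
--             while phone_end < n:
--                 char = text[phone_end]
--                 if char.isdigit():
--                     digit_count += 1
--                     digits_only.append(char)
--                     phone_end += 1
--                 elif char in (' ', '-', '(', ')', '.', '+'):
--                     has_separator = True
--                     phone_end += 1
--                 else:
--                     break
--
--             # Remove trailing separators
--             while phone_end > phone_start and text[phone_end - 1] in '.-':
--                 phone_end -= 1
--
--             digits_str = ''.join(digits_only)
--
--             # Determine whether it qualifies as a phone number
--             is_pure_sequence = (10 <= digit_count <= 12) and not has_separator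
--             is_formatted_phone = (9 <= digit_count <= 15) and has_separator
--             is_ukrainian = check_ukrainian_operator(digits_str)
--
--             if is_pure_sequence or is_formatted_phone or is_ukrainian:
--                 result.append(f"[{file_name}_PhoneNumber]")
--                 i = phone_end
--             else:
--                 result.append(text[i])
--                 i += 1
--         else:
--             result.append(text[i])
--             i += 1
--
--     return ''.join(result)
-- ===== SOURCE B (Python) =====
-- from typing import Set
--
-- UKRAINIAN_OPERATOR_CODES: Set[str] = {
--     '067', '068', '096', '097', '098',
--     '050', '066', '095', '099',
--     '063', '073', '093',
--     '094', '092', '091', '089',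
-- }
--
-- _PHONE_CHARS = set(' -().+')
--
--
-- def _is_ukrainian(dchars, d_before):
--     """O(1): look at at most 6 digit characters after position d_before."""
--     d = dchars[d_before:d_before + 6]
--     code = d[3:6] if ''.join(d[:3]) == '380' else d[:3]
--     return len(code) == 3 and ''.join(code) in UKRAINIAN_OPERATOR_CODES
--
--
-- def deletePhoneInformationManual(text: str, file_name: str) -> str:
--     """One pass over maximal runs of phone characters; each candidate start
--     inside a run is classified in O(1) via precomputed digit data."""
--     token = f"[{file_name}_PhoneNumber]"
--     out = []
--     n = len(text)
--     i = 0
--     while i < n: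
--         c = text[i]
--         if not (c.isdigit() or c in _PHONE_CHARS):
--             out.append(c)
--             i += 1
--             continue
--         # maximal run of phone characters starting at i
--         j = i
--         while j < n and (text[j].isdigit() or text[j] in _PHONE_CHARS):
--             j += 1
--         run = text[i:j]
--         m = len(run)
--         dchars = [ch for ch in run if ch.isdigit()]
--         tot_d = len(dchars)
--         # length of the run with trailing '.' / '-' stripped
--         t = m
--         while t > 0 and run[t - 1] in '.-':
--             t -= 1
--         d_before = 0
--         s = 0
--         while s < m:
--             ch = run[s]
--             if ch.isdigit() or ch in '+(':
--                 dc = tot_d - d_before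
--                 hs = (m - s) - dc > 0
--                 if (10 <= dc <= 12 and not hs) or (9 <= dc <= 15 and hs) \
--                         or _is_ukrainian(dchars, d_before):
--                     out.append(token)
--                     out.append(run[t:])
--                     break
--             out.append(ch)
--             if ch.isdigit():
--                 d_before += 1
--             s += 1
--         i = j
--     return ''.join(out)
-- ===== Notes on version B (the rewrite author's own statement) =====
-- stated objective: faster
-- what changed: B scans each maximal run of phone characters once, precomputing the run's digit list, digit total and trimmed length, and classifies every candidate start inside the run in O(1), instead of A's re-collecting and re-counting the whole remaining run from every start position.
import Mathlib
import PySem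

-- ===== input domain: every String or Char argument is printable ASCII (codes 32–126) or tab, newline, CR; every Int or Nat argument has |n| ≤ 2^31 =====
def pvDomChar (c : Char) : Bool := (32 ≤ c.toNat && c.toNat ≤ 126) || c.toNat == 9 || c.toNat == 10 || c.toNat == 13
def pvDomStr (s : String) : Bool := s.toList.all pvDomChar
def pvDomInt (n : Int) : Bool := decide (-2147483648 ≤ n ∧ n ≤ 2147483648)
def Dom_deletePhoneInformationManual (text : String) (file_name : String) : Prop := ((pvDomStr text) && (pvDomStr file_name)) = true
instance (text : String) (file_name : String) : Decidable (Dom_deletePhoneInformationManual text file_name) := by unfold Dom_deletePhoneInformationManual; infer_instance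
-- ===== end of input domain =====

-- B replaces A's quadratic rescan of each phone-character run (A re-collects the whole
-- remaining run from every candidate start) by a single pass per maximal run with the run's
-- digit list, digit total and trimmed length computed once, classifying each start in O(1).

-- the module constant UKRAINIAN_OPERATOR_CODES (used by both Python files)
def pvUkrCodes : List (List Char) :=
  [['0','6','7'], ['0','6','8'], ['0','9','6'], ['0','9','7'], ['0','9','8'],
   ['0','5','0'], ['0','6','6'], ['0','9','5'], ['0','9','9'],
   ['0','6','3'], ['0','7','3'], ['0','9','3'],
   ['0','9','4'], ['0','9','2'], ['0','9','1'], ['0','8','9']]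

-- ===== PORT A =====
-- char in (' ', '-', '(', ')', '.', '+')
def pvSepA (c : Char) : Bool := c == ' ' || c == '-' || c == '(' || c == ')' || c == '.' || c == '+'
-- text[i].isdigit() or text[i] == '+' or text[i] == '('
def pvTrigA (c : Char) : Bool := c.isDigit || c == '+' || c == '('
-- text[phone_end - 1] in '.-'
def pvTrimA (c : Char) : Bool := c == '.' || c == '-'

-- check_ukrainian_operator
def pvCheckUkrA (digits : List Char) : Bool :=
  let digits := if digits.take 3 = ['3','8','0'] then digits.drop 3 else digits
  if 3 ≤ digits.length then pvUkrCodes.contains (digits.take 3) else false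

-- the inner collecting while-loop: returns (digit_count, has_separator, digits_only, taken, rest)
def pvCollectA : List Char → Nat × Bool × List Char × List Char × List Char
  | [] => (0, false, [], [], [])
  | c :: t =>
    if c.isDigit then
      let (dc, hs, ds, tk, r) := pvCollectA t
      (dc + 1, hs, c :: ds, c :: tk, r)
    else if pvSepA c then
      let (dc, hs, ds, tk, r) := pvCollectA t
      (dc, true, ds, c :: tk, r)
    else (0, false, [], [], c :: t)

-- is_pure_sequence or is_formatted_phone or is_ukrainian
def pvQualA (dc : Nat) (hs : Bool) (ds : List Char) : Bool :=
  (decide (10 ≤ dc ∧ dc ≤ 12) && !hs) || (decide (9 ≤ dc ∧ dc ≤ 15) && hs) || pvCheckUkrA ds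

lemma pvCollectA_split : ∀ l : List Char,
    (pvCollectA l).2.2.2.1 ++ (pvCollectA l).2.2.2.2 = l := by
  intro l
  induction l with
  | nil => simp [pvCollectA]
  | cons c t ih =>
    unfold pvCollectA
    split_ifs with h1 h2 <;> simp_all

lemma pvTrigA_not_trim {c : Char} (h : pvTrigA c = true) : pvTrimA c = false := by
  simp only [pvTrigA, Bool.or_eq_true, beq_iff_eq] at h
  rcases h with (h | h) | h
  · simp only [pvTrimA, Bool.or_eq_false_iff, beq_eq_false_iff_ne, ne_eq]
    constructor <;> rintro rfl <;> simp [Char.isDigit] at h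
  · subst h; decide
  · subst h; decide

lemma pvCollectA_cons_trig {c : Char} (t : List Char) (h : pvTrigA c = true) :
    ∃ tk', (pvCollectA (c :: t)).2.2.2.1 = c :: tk' := by
  unfold pvCollectA
  split_ifs with h1 h2
  · exact ⟨(pvCollectA t).2.2.2.1, by simp⟩
  · exact ⟨(pvCollectA t).2.2.2.1, by simp⟩
  · exfalso
    simp only [pvTrigA, Bool.or_eq_true, beq_iff_eq] at h
    rcases h with (h | h) | h
    · exact h1 h
    · subst h; exact h2 (by decide)
    · subst h; exact h2 (by decide)

lemma pvTakeWhile_lt {p : Char → Bool} : ∀ (l : List Char) (x : Char),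
    x ∈ l → p x = false → (l.takeWhile p).length < l.length := by
  intro l
  induction l with
  | nil => intro x hx; simp at hx
  | cons a t ih =>
    intro x hx hpx
    by_cases ha : p a
    · have hxt : x ∈ t := by
        rcases List.mem_cons.1 hx with rfl | hxt
        · rw [ha] at hpx; cases hpx
        · exact hxt
      simp only [List.takeWhile_cons, ha, if_true, List.length_cons]
      exact Nat.succ_lt_succ (ih x hxt hpx)
    · simp only [List.takeWhile_cons, ha]
      simp

lemma pvOuterA_decr (c : Char) (rest : List Char) (h : pvTrigA c = true) :
    ((((pvCollectA (c :: rest)).2.2.2.1.reverse.takeWhile pvTrimA).reverse)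
      ++ (pvCollectA (c :: rest)).2.2.2.2).length < (c :: rest).length := by
  obtain ⟨tk', htk⟩ := pvCollectA_cons_trig rest h
  have hsplit := pvCollectA_split (c :: rest)
  have hlen : (pvCollectA (c :: rest)).2.2.2.1.length + (pvCollectA (c :: rest)).2.2.2.2.length
      = (c :: rest).length := by
    rw [← List.length_append, hsplit]
  have hmem : c ∈ (pvCollectA (c :: rest)).2.2.2.1.reverse := by
    rw [htk]; simp
  have hlt := pvTakeWhile_lt (p := pvTrimA) _ c hmem (pvTrigA_not_trim h)
  rw [List.length_reverse] at hlt
  simp only [List.length_append, List.length_reverse]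
  omega

-- the outer while-loop of A; tok is the (constant) replacement token
def pvOuterA (tok : List Char) : List Char → List Char
  | [] => []
  | c :: rest =>
    if h : pvTrigA c = true then
      let res := pvCollectA (c :: rest)
      if pvQualA res.1 res.2.1 res.2.2.1 then
        tok ++ pvOuterA tok ((res.2.2.2.1.reverse.takeWhile pvTrimA).reverse ++ res.2.2.2.2)
      else c :: pvOuterA tok rest
    else c :: pvOuterA tok rest
  termination_by l => l.length
  decreasing_by
  · exact pvOuterA_decr c rest h
  · simp
  · simp

def deletePhoneInformationManual (text : String) (file_name : String) : String :=
  String.mk (pvOuterA ("[" ++ file_name ++ "_PhoneNumber]").toList text.toList)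

-- ===== PORT B =====
-- c.isdigit() or c in _PHONE_CHARS
def pvPhoneB (c : Char) : Bool :=
  c.isDigit || c == ' ' || c == '-' || c == '(' || c == ')' || c == '.' || c == '+'
-- ch.isdigit() or ch in '+('
def pvTrigB (c : Char) : Bool := c.isDigit || c == '+' || c == '('
-- run[t-1] in '.-'
def pvTrimB (c : Char) : Bool := c == '.' || c == '-'

-- _is_ukrainian: looks at at most 6 digit characters after position dB
def pvCheckUkrB (dchars : List Char) (dB : Nat) : Bool :=
  let d := (dchars.drop dB).take 6
  let code := if d.take 3 = ['3','8','0'] then (d.drop 3).take 3 else d.take 3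
  code.length == 3 && pvUkrCodes.contains code

-- the per-run loop of B: walks the run suffix carrying the running digit count dB;
-- totD/dchars/trail are the run's precomputed digit total, digit list and trimmed-off tail
def pvRunB (tok : List Char) (totD : Nat) (dchars trail : List Char) :
    List Char → Nat → List Char
  | [], _ => []
  | c :: t, dB =>
    if pvTrigB c then
      let dc := totD - dB
      let hs := decide (dc < (c :: t).length)
      if (decide (10 ≤ dc ∧ dc ≤ 12) && !hs) || (decide (9 ≤ dc ∧ dc ≤ 15) && hs)
          || pvCheckUkrB dchars dB then
        tok ++ trail
      else c :: pvRunB tok totD dchars trail t (dB + if c.isDigit then 1 else 0)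
    else c :: pvRunB tok totD dchars trail t (dB + if c.isDigit then 1 else 0)

-- the outer loop of B: per maximal run of phone characters, precompute once, then pvRunB
def pvOuterB (tok : List Char) : List Char → List Char
  | [] => []
  | c :: rest =>
    if h : pvPhoneB c = true then
      let run := (c :: rest).takeWhile pvPhoneB
      let rest' := (c :: rest).dropWhile pvPhoneB
      let dchars := run.filter Char.isDigit
      let t := run.length - (run.reverse.takeWhile pvTrimB).length
      pvRunB tok dchars.length dchars (run.drop t) run 0 ++ pvOuterB tok rest'
    else c :: pvOuterB tok rest
  termination_by l => l.length
  decreasing_by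
  · simp only [List.dropWhile_cons, h, if_true, List.length_cons]
    exact Nat.lt_succ_of_le (List.length_dropWhile_le _ _)
  · simp

def deletePhoneInformationManual_alt (text : String) (file_name : String) : String :=
  String.mk (pvOuterB ("[" ++ file_name ++ "_PhoneNumber]").toList text.toList)

-- ===== PRECONDITION & SPEC =====
def Spec_deletePhoneInformationManual (text : String) (file_name : String) (out : String) : Prop := out = deletePhoneInformationManual_alt text file_name
instance (text : String) (file_name : String) (out : String) : Decidable (Spec_deletePhoneInformationManual text file_name out) := by unfold Spec_deletePhoneInformationManual; infer_instance

-- ===== CLAIM (what is proved, stated in full; the proofs are below) =====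
def Claim_equal_deletePhoneInformationManual : Prop := ∀ (text : String) (file_name : String), Dom_deletePhoneInformationManual text file_name → Spec_deletePhoneInformationManual text file_name (deletePhoneInformationManual text file_name)

-- ===== LEMMAS AND PROOFS =====

lemma pvPhoneB_eq (c : Char) : pvPhoneB c = (c.isDigit || pvSepA c) := by
  simp [pvPhoneB, pvSepA, Bool.or_assoc]

lemma pvDigit_not_sep {c : Char} (h : c.isDigit = true) : pvSepA c = false := by
  simp only [pvSepA, Bool.or_eq_false_iff, beq_eq_false_iff_ne, ne_eq]
  refine ⟨⟨⟨⟨⟨?_, ?_⟩, ?_⟩, ?_⟩, ?_⟩, ?_⟩ <;> rintro rfl <;> simp [Char.isDigit] at h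

lemma pvDigit_not_trim {c : Char} (h : c.isDigit = true) : pvTrimA c = false := by
  simp only [pvTrimA, Bool.or_eq_false_iff, beq_eq_false_iff_ne, ne_eq]
  constructor <;> rintro rfl <;> simp [Char.isDigit] at h

lemma pvTrim_not_trig {c : Char} (h : pvTrimA c = true) : pvTrigA c = false := by
  simp only [pvTrimA, Bool.or_eq_true, beq_iff_eq] at h
  rcases h with h | h <;> subst h <;> decide

lemma pvTrigA_phone {c : Char} (h : pvTrigA c = true) : pvPhoneB c = true := by
  simp only [pvTrigA, Bool.or_eq_true, beq_iff_eq] at h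
  rcases h with (h | h) | h
  · simp [pvPhoneB, h]
  · subst h; decide
  · subst h; decide

-- characterisation of A's collect loop
lemma pvCollectA_spec : ∀ l : List Char,
    pvCollectA l =
      (((l.takeWhile pvPhoneB).filter Char.isDigit).length,
       (l.takeWhile pvPhoneB).any pvSepA,
       (l.takeWhile pvPhoneB).filter Char.isDigit,
       l.takeWhile pvPhoneB,
       l.dropWhile pvPhoneB) := by
  intro l
  induction l with
  | nil => simp [pvCollectA]
  | cons c t ih =>
    unfold pvCollectA
    by_cases h1 : c.isDigit
    · simp [h1, ih, List.takeWhile_cons, List.dropWhile_cons, pvPhoneB_eq,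
        List.filter_cons, pvDigit_not_sep h1]
    · by_cases h2 : pvSepA c
      · simp [h1, h2, ih, List.takeWhile_cons, List.dropWhile_cons, pvPhoneB_eq,
          List.filter_cons]
      · simp [h1, h2, List.takeWhile_cons, List.dropWhile_cons, pvPhoneB_eq]

-- the ukrainian check only depends on the first six digits
lemma pvCheckUkr_eq (dchars : List Char) (dB : Nat) :
    pvCheckUkrB dchars dB = pvCheckUkrA (dchars.drop dB) := by
  unfold pvCheckUkrB pvCheckUkrA
  set ds := dchars.drop dB with hds
  have h1 : (ds.take 6).take 3 = ds.take 3 := by rw [List.take_take]; norm_num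
  have h2 : ((ds.take 6).drop 3).take 3 = (ds.drop 3).take 3 := by
    rw [List.drop_take, List.take_take]; norm_num
  simp only [h1, h2]
  by_cases h380 : ds.take 3 = ['3', '8', '0']
  · rw [if_pos h380, if_pos h380]
    by_cases hl : 3 ≤ (ds.drop 3).length
    · rw [if_pos hl]
      have hlen : ((ds.drop 3).take 3).length = 3 := by
        simp only [List.length_take]; omega
      simp [hlen]
    · rw [if_neg hl]
      have hlen : ((ds.drop 3).take 3).length ≠ 3 := by
        simp only [List.length_take]; omega
      simp only [List.length_drop] at hl
      simp [hlen]
      intro hcon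
      omega
  · rw [if_neg h380, if_neg h380]
    by_cases hl : 3 ≤ ds.length
    · rw [if_pos hl]
      have hlen : (ds.take 3).length = 3 := by
        simp only [List.length_take]; omega
      simp [hlen]
    · rw [if_neg hl]
      have hlen : (ds.take 3).length ≠ 3 := by
        simp only [List.length_take]; omega
      simp [hlen]
      exact fun hcon => absurd hcon hl

-- has_separator over an all-phone list = "fewer digits than characters"
lemma pvAnySep_eq : ∀ rs : List Char, (∀ c ∈ rs, pvPhoneB c = true) →
    rs.any pvSepA = decide ((rs.filter Char.isDigit).length < rs.length) := by
  intro rs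
  induction rs with
  | nil => intro _; simp
  | cons c t ih =>
    intro hall
    have hc : pvPhoneB c = true := hall c (List.mem_cons_self ..)
    rw [pvPhoneB_eq] at hc
    by_cases hd : c.isDigit
    · rw [List.any_cons, pvDigit_not_sep hd, Bool.false_or,
        ih (fun x hx => hall x (List.mem_cons_of_mem _ hx))]
      simp only [List.filter_cons, hd, if_true, List.length_cons]
      exact decide_eq_decide.2 (by omega)
    · rw [Bool.not_eq_true] at hd
      have hsep : pvSepA c = true := by
        simp only [Bool.or_eq_true] at hc
        rcases hc with h | h
        · rw [h] at hd; cases hd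
        · exact h
      rw [List.any_cons, hsep, Bool.true_or]
      have := List.length_filter_le Char.isDigit t
      simp only [List.filter_cons, hd, Bool.false_eq_true, if_false, List.length_cons]
      exact (decide_eq_true (by omega)).symm

-- checkUkrA succeeding needs at least three digits
lemma pvCheckUkrA_len {ds : List Char} (h : pvCheckUkrA ds = true) : 3 ≤ ds.length := by
  unfold pvCheckUkrA at h
  by_cases h380 : ds.take 3 = ['3', '8', '0']
  · simp only [h380, if_true] at h
    by_cases hl : 3 ≤ (ds.drop 3).length
    · have h2 : (List.drop 3 ds).length = ds.length - 3 := List.length_drop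
      omega
    · rw [if_neg hl] at h
      exact absurd h (by simp)
  · simp only [h380, if_false] at h
    by_cases hl : 3 ≤ ds.length
    · exact hl
    · rw [if_neg hl] at h
      exact absurd h (by simp)

-- qualifying needs at least one digit
lemma pvQualA_pos {dc : Nat} {hs : Bool} {ds : List Char} (h : pvQualA dc hs ds = true)
    (hdc : dc = ds.length) : 1 ≤ ds.length := by
  unfold pvQualA at h
  simp only [Bool.or_eq_true, Bool.and_eq_true, decide_eq_true_eq] at h
  rcases h with (⟨⟨h1, _⟩, _⟩ | ⟨⟨h1, _⟩, _⟩) | h1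
  · omega
  · omega
  · have := pvCheckUkrA_len h1
    omega

-- a block of non-trigger characters is emitted literally by A's outer loop
lemma pvOuterA_lit (tok : List Char) : ∀ (l rest : List Char),
    (∀ c ∈ l, pvTrigA c = false) →
    pvOuterA tok (l ++ rest) = l ++ pvOuterA tok rest := by
  intro l
  induction l with
  | nil => intro rest _; simp
  | cons a t ih =>
    intro rest hall
    have ha : pvTrigA a = false := hall a (List.mem_cons_self ..)
    rw [List.cons_append, pvOuterA]
    simp only [ha, Bool.false_eq_true, dite_false]
    rw [ih rest (fun x hx => hall x (List.mem_cons_of_mem _ hx))]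
    rfl

lemma pvHead_dropWhile {p : Char → Bool} : ∀ (l : List Char) (c : Char),
    (l.dropWhile p).head? = some c → p c = false := by
  intro l
  induction l with
  | nil => intro c h; simp at h
  | cons a t ih =>
    intro c h
    by_cases ha : p a
    · exact ih c (by simpa [List.dropWhile_cons, ha] using h)
    · rw [Bool.not_eq_true] at ha
      simp only [List.dropWhile_cons, ha, Bool.false_eq_true, if_false, List.head?_cons,
        Option.some.injEq] at h
      rw [← h]; exact ha

lemma pvAll_takeWhile {p : Char → Bool} : ∀ l : List Char, (∀ x ∈ l, p x = true) →
    l.takeWhile p = l ∧ l.dropWhile p = [] := by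
  intro l
  induction l with
  | nil => intro _; simp
  | cons a t ih =>
    intro h
    have ha := h a (List.mem_cons_self ..)
    have ht := ih (fun x hx => h x (List.mem_cons_of_mem _ hx))
    simp [List.takeWhile_cons, List.dropWhile_cons, ha, ht.1, ht.2]

-- the core: A's scan over a run ++ rest' equals B's per-run loop, for every start offset
lemma pvRun_eq (tok R rest' : List Char)
    (hR : ∀ c ∈ R, pvPhoneB c = true)
    (hrest : ∀ c, rest'.head? = some c → pvPhoneB c = false) :
    ∀ k s, s ≤ R.length → k = R.length - s →
    pvOuterA tok (R.drop s ++ rest') =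
      pvRunB tok (R.filter Char.isDigit).length (R.filter Char.isDigit)
        (R.drop (R.length - (R.reverse.takeWhile pvTrimB).length))
        (R.drop s) (((R.take s).filter Char.isDigit).length) ++ pvOuterA tok rest' := by
  intro k
  induction k with
  | zero =>
    intro s hs hk
    have hs' : s = R.length := by omega
    subst hs'
    simp [List.drop_length, pvRunB]
  | succ k ih =>
    intro s hs hk
    have hslt : s < R.length := by omega
    have hdrop : R.drop s = R[s] :: R.drop (s + 1) := (List.getElem_cons_drop hslt).symm
    have hallrs : ∀ x ∈ R.drop s, pvPhoneB x = true := fun x hx => hR x (List.drop_subset _ _ hx)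
    have htwrest : rest'.takeWhile pvPhoneB = [] := by
      cases hre : rest' with
      | nil => simp
      | cons a t =>
        have ha := hrest a (by rw [hre]; rfl)
        simp [List.takeWhile_cons, ha]
    have hdwrest : rest'.dropWhile pvPhoneB = rest' := by
      cases hre : rest' with
      | nil => simp
      | cons a t =>
        have ha := hrest a (by rw [hre]; rfl)
        simp [List.dropWhile_cons, ha]
    have hrs := pvAll_takeWhile (R.drop s) hallrs
    have htw : (R.drop s ++ rest').takeWhile pvPhoneB = R.drop s := by
      rw [List.takeWhile_append, if_pos (by rw [hrs.1]), htwrest, List.append_nil]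
    have hdw : (R.drop s ++ rest').dropWhile pvPhoneB = rest' := by
      rw [List.dropWhile_append, if_pos (by rw [hrs.2]; rfl), hdwrest]
    have hcol : pvCollectA (R.drop s ++ rest') =
        (((R.drop s).filter Char.isDigit).length,
         (R.drop s).any pvSepA,
         (R.drop s).filter Char.isDigit,
         R.drop s, rest') := by
      rw [pvCollectA_spec, htw, hdw]
    have hsplitF : R.filter Char.isDigit
        = (R.take s).filter Char.isDigit ++ (R.drop s).filter Char.isDigit := by
      rw [← List.filter_append, List.take_append_drop]
    have hdc : (R.filter Char.isDigit).length - ((R.take s).filter Char.isDigit).length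
        = ((R.drop s).filter Char.isDigit).length := by
      rw [hsplitF, List.length_append]; omega
    have hdchars : (R.filter Char.isDigit).drop ((R.take s).filter Char.isDigit).length
        = (R.drop s).filter Char.isDigit := by
      rw [hsplitF, List.drop_left]
    have hhs : (R.drop s).any pvSepA
        = decide (((R.drop s).filter Char.isDigit).length < (R.drop s).length) :=
      pvAnySep_eq _ hallrs
    have hdB1 : ((R.take (s + 1)).filter Char.isDigit).length
        = ((R.take s).filter Char.isDigit).length + (if R[s].isDigit then 1 else 0) := by
      rw [List.take_add_one, List.getElem?_eq_getElem hslt]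
      simp only [Option.toList_some, List.filter_append, List.length_append]
      by_cases hdig : R[s].isDigit <;> simp [List.filter_cons, hdig]
    rw [hdrop, List.cons_append, pvOuterA, pvRunB]
    have hcol2 : pvCollectA (R[s] :: (R.drop (s + 1) ++ rest')) =
        (((R.drop s).filter Char.isDigit).length,
         (R.drop s).any pvSepA,
         (R.drop s).filter Char.isDigit,
         R.drop s, rest') := by
      rw [show R[s] :: (R.drop (s + 1) ++ rest') = R.drop s ++ rest' by
        rw [hdrop, List.cons_append]]
      exact hcol
    rw [hcol2]
    dsimp only
    have htrigEq : pvTrigB R[s] = pvTrigA R[s] := rfl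
    by_cases htrig : pvTrigA R[s] = true
    · rw [dif_pos htrig, if_pos (htrigEq.trans (by rw [htrig]))]
      rw [hdc, show R[s] :: R.drop (s + 1) = R.drop s from hdrop.symm, ← hhs,
        pvCheckUkr_eq, hdchars]
      rw [← pvQualA.eq_def]
      by_cases hq : pvQualA ((R.drop s).filter Char.isDigit).length
          ((R.drop s).any pvSepA) ((R.drop s).filter Char.isDigit) = true
      · rw [if_pos hq, if_pos hq]
        -- qualifying: token plus the trimmed-off tail
        have hpos : 1 ≤ ((R.drop s).filter Char.isDigit).length := pvQualA_pos hq rfl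
        have hne : (R.drop s).filter Char.isDigit ≠ [] := by
          intro he; rw [he] at hpos; simp at hpos
        obtain ⟨x, hxmem⟩ := List.exists_mem_of_ne_nil _ hne
        have hxR : x ∈ R.drop s := (List.mem_filter.1 hxmem).1
        have hxd : x.isDigit = true := (List.mem_filter.1 hxmem).2
        have hxtrim : pvTrimA x = false := pvDigit_not_trim hxd
        have hRrev : R.reverse = (R.drop s).reverse ++ (R.take s).reverse := by
          conv_lhs => rw [← List.take_append_drop s R]
          rw [List.reverse_append]
        have hlt := pvTakeWhile_lt (p := pvTrimA) ((R.drop s).reverse) x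
          (List.mem_reverse.2 hxR) hxtrim
        have htwEq : R.reverse.takeWhile pvTrimA = (R.drop s).reverse.takeWhile pvTrimA := by
          rw [hRrev, List.takeWhile_append,
            if_neg (fun hcl => absurd hcl (Nat.ne_of_lt hlt))]
        have hpre : R.reverse.takeWhile pvTrimA
            = R.reverse.take ((R.reverse.takeWhile pvTrimA).length) :=
          List.prefix_iff_eq_take.1 (List.takeWhile_prefix _)
        have hBA : pvTrimB = pvTrimA := rfl
        have htrail : ((R.drop s).reverse.takeWhile pvTrimA).reverse
            = R.drop (R.length - (R.reverse.takeWhile pvTrimB).length) := by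
          rw [hBA]
          conv_lhs => rw [← htwEq, hpre]
          rw [List.take_reverse, List.reverse_reverse]
        have hmemtrail : ∀ ch ∈ R.drop (R.length - (R.reverse.takeWhile pvTrimB).length),
            pvTrigA ch = false := by
          intro ch hch
          rw [← htrail] at hch
          exact pvTrim_not_trig (List.mem_takeWhile_imp (List.mem_reverse.1 hch))
        rw [htrail, pvOuterA_lit tok _ rest' hmemtrail, List.append_assoc]
      · rw [if_neg hq, if_neg hq, List.cons_append]
        congr 1
        rw [ih (s + 1) (by omega) (by omega), hdB1]
    · rw [dif_neg htrig, if_neg (fun hb => htrig (htrigEq.symm.trans hb))]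
      rw [List.cons_append]
      congr 1
      rw [ih (s + 1) (by omega) (by omega), hdB1]

lemma pvOuter_eq (tok : List Char) : ∀ l : List Char, pvOuterA tok l = pvOuterB tok l := by
  have main : ∀ n l, l.length ≤ n → pvOuterA tok l = pvOuterB tok l := by
    intro n
    induction n with
    | zero =>
      intro l hl
      have : l = [] := List.length_eq_zero_iff.1 (by omega)
      subst this
      rw [pvOuterA, pvOuterB]
    | succ n ihn =>
      intro l hl
      cases l with
      | nil => rw [pvOuterA, pvOuterB]
      | cons c rest =>
        by_cases hp : pvPhoneB c = true
        · have hRr : (c :: rest).takeWhile pvPhoneB ++ (c :: rest).dropWhile pvPhoneB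
              = c :: rest := List.takeWhile_append_dropWhile
          have hRne : (c :: rest).takeWhile pvPhoneB = c :: rest.takeWhile pvPhoneB := by
            simp [List.takeWhile_cons, hp]
          have hR : ∀ x ∈ (c :: rest).takeWhile pvPhoneB, pvPhoneB x = true :=
            fun x hx => List.mem_takeWhile_imp hx
          have hrest : ∀ x, ((c :: rest).dropWhile pvPhoneB).head? = some x →
              pvPhoneB x = false := fun x hx => pvHead_dropWhile _ x hx
          have hlsum : ((c :: rest).takeWhile pvPhoneB).length
              + ((c :: rest).dropWhile pvPhoneB).length = rest.length + 1 := by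
            rw [← List.length_append, hRr]; rfl
          have hlen : ((c :: rest).dropWhile pvPhoneB).length ≤ n := by
            have h1 : 1 ≤ ((c :: rest).takeWhile pvPhoneB).length := by
              rw [hRne]; simp
            simp only [List.length_cons] at hl
            omega
          have hrun := pvRun_eq tok ((c :: rest).takeWhile pvPhoneB)
            ((c :: rest).dropWhile pvPhoneB) hR hrest
            ((c :: rest).takeWhile pvPhoneB).length 0 (by omega) (by omega)
          simp only [List.drop_zero, List.take_zero, List.filter_nil,
            List.length_nil] at hrun
          rw [pvOuterB]
          simp only [hp, dite_true]
          rw [show pvOuterA tok (c :: rest) = pvOuterA tok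
              ((c :: rest).takeWhile pvPhoneB ++ (c :: rest).dropWhile pvPhoneB) by
            rw [hRr]]
          rw [hrun, ihn _ hlen]
        · have htri : pvTrigA c = false := by
            by_cases ht : pvTrigA c = true
            · exact absurd (pvTrigA_phone ht) hp
            · rwa [Bool.not_eq_true] at ht
          rw [pvOuterA, pvOuterB]
          simp only [htri, hp, Bool.false_eq_true, dite_false]
          have : rest.length ≤ n := by
            simp only [List.length_cons] at hl
            omega
          rw [ihn rest this]
  exact fun l => main l.length l le_rfl

-- ===== VERDICT (by name: the statement is the Claim_ definition above) =====
theorem deletePhoneInformationManual_spec : Claim_equal_deletePhoneInformationManual := by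
  intro text file_name _
  unfold Spec_deletePhoneInformationManual deletePhoneInformationManual deletePhoneInformationManual_alt
  rw [pvOuter_eq]
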